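-- pv_equiv track=rewrite | github.com/ph56jk/flow | flow_web/service.py | _ordered_reference_media_names
-- ===== SOURCE A (Python) =====
-- from typing import Any, Callable, Dict, List
--
-- def _ordered_reference_media_names(
--
--     media_items: List[Dict[str, str]],
--     fallback_names: List[str] | None = None,
-- ) -> List[str]:
--     ordered: List[str] = []
--     seen: set[str] = set()
--
--     def push(name: str) -> None:
--         safe_name = str(name or "").strip()
--         if not safe_name or safe_name in seen:
--             return
--         seen.add(safe_name)
--         ordered.append(safe_name)
--
--     for role in ("base", "product", "logo", "reference"):
--         for item in media_items:
--             if str(item.get("role") or "") == role: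
--                 push(item.get("media_name", ""))
--
--     for name in fallback_names or []:
--         push(name)
--     return ordered
-- ===== SOURCE B (Python) =====
-- def _ordered_reference_media_names(media_items, fallback_names=None):
--     # Stage 1: one pass bucketing media names by role.
--     buckets = {}
--     for item in media_items:
--         buckets.setdefault(str(item.get("role") or ""), []).append(item.get("media_name", ""))
--     # Stage 2: flatten the candidates in priority order, then the fallbacks.
--     names = []
--     for role in ("base", "product", "logo", "reference"):
--         names.extend(buckets.get(role, []))
--     names.extend(fallback_names or [])
--     # Stage 3: strip everything, dedup by first occurrence with dict.fromkeys, drop empties.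
--     stripped = [str(raw or "").strip() for raw in names]
--     return [name for name in dict.fromkeys(stripped) if name]
-- ===== Notes on version B (the rewrite author's own statement) =====
-- stated objective: alternative
-- what changed: Replaces A's four role-wise scans with interleaved push/seen-set bookkeeping by a staged pipeline: one bucketing pass over media_items grouping names by role, a flattening of the buckets in priority order plus fallbacks into one candidate list, then strip-all and a dict.fromkeys first-occurrence dedup with empties filtered out (no seen set, no push closure).
import Mathlib
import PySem

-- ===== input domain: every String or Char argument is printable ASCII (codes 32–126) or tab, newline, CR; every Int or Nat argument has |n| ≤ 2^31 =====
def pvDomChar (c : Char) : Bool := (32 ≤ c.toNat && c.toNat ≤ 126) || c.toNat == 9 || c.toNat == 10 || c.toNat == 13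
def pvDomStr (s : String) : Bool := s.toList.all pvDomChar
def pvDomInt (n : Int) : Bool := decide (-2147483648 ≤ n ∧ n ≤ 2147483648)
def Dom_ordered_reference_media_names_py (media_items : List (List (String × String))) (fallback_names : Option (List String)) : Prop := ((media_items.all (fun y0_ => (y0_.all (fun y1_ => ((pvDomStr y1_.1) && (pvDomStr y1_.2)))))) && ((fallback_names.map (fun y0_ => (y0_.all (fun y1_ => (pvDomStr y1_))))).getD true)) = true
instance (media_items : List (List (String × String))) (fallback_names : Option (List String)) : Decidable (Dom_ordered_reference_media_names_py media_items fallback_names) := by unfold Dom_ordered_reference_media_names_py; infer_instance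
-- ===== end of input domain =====

-- B replaces A's four role-wise scans with interleaved push/seen-set bookkeeping by a staged
-- pipeline: bucket names by role in one pass, flatten the buckets in priority order plus the
-- fallbacks into one candidate list, then strip everything and dedup by first occurrence with
-- dict.fromkeys, filtering out empties (no seen set, no push closure): a different decomposition.

-- ===== PORT A =====
-- push: safe_name = str(name or "").strip(); skip if empty or seen; else record.
-- (str(name or "") is the identity on a Python str: "" stays "", a non-empty string is unchanged.)
def pushA (st : List String × PySem.Set String) (name : String) : List String × PySem.Set String :=
  let safe_name := PySem.Str.strip name
  if safe_name = "" ∨ PySem.Set.contains st.2 safe_name then st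
  else (st.1 ++ [safe_name], PySem.Set.add st.2 safe_name)

def ordered_reference_media_names_py (media_items : List (List (String × String))) (fallback_names : Option (List String)) : List String :=
  -- ordered = [], seen = set()
  let st : List String × PySem.Set String := ([], PySem.Set.empty)
  -- for role in ("base","product","logo","reference"): for item in media_items:
  --   if str(item.get("role") or "") == role: push(item.get("media_name", ""))
  let st := (["base", "product", "logo", "reference"]).foldl (fun st role =>
      media_items.foldl (fun st item =>
        if (PySem.Dict.mk item).getD "role" "" == role
        then pushA st ((PySem.Dict.mk item).getD "media_name" "")
        else st) st) st
  -- for name in fallback_names or []: push(name)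
  let st := (fallback_names.getD []).foldl pushA st
  st.1

-- ===== PORT B =====
-- buckets = {}; for item in media_items: buckets.setdefault(str(item.get("role") or ""), []).append(item.get("media_name", ""))
def bucketsB (media_items : List (List (String × String))) : PySem.Dict String (List String) :=
  media_items.foldl (fun d item =>
    d.modify ((PySem.Dict.mk item).getD "role" "") []
      (· ++ [(PySem.Dict.mk item).getD "media_name" ""])) PySem.Dict.empty

def ordered_reference_media_names_py_alt (media_items : List (List (String × String))) (fallback_names : Option (List String)) : List String :=
  let buckets := bucketsB media_items
  -- names = []; for role in (...): names.extend(buckets.get(role, [])); names.extend(fallback_names or [])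
  let names := (["base", "product", "logo", "reference"]).foldl
      (fun acc role => acc ++ buckets.getD role []) []
  let names := names ++ fallback_names.getD []
  -- stripped = [str(raw or "").strip() for raw in names]; return [name for name in dict.fromkeys(stripped) if name]
  let stripped := names.map PySem.Str.strip
  (PySem.List.dedup stripped).filter (fun name => name ≠ "")

-- ===== PRECONDITION & SPEC =====
def Spec_ordered_reference_media_names_py (media_items : List (List (String × String))) (fallback_names : Option (List String)) (out : List String) : Prop := out = ordered_reference_media_names_py_alt media_items fallback_names
instance (media_items : List (List (String × String))) (fallback_names : Option (List String)) (out : List String) : Decidable (Spec_ordered_reference_media_names_py media_items fallback_names out) := by unfold Spec_ordered_reference_media_names_py; infer_instance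

-- ===== CLAIM (what is proved, stated in full; the proofs are below) =====
def Claim_equal_ordered_reference_media_names_py : Prop := ∀ (media_items : List (List (String × String))) (fallback_names : Option (List String)), Dom_ordered_reference_media_names_py media_items fallback_names → Spec_ordered_reference_media_names_py media_items fallback_names (ordered_reference_media_names_py media_items fallback_names)

-- ===== LEMMAS AND PROOFS =====

-- The names of the media_items whose role is `role`, in encounter order.
def pvCand (media_items : List (List (String × String))) (role : String) : List String :=
  (media_items.filter (fun item => (PySem.Dict.mk item).getD "role" "" == role)).map
    (fun item => (PySem.Dict.mk item).getD "media_name" "")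

lemma foldl_if_filter_map {α β σ : Type} (p : α → Bool) (g : α → β) (f : σ → β → σ) :
    ∀ (l : List α) (st : σ),
      l.foldl (fun st x => if p x then f st (g x) else st) st = ((l.filter p).map g).foldl f st := by
  intro l
  induction l with
  | nil => intro st; rfl
  | cons hd tl ih =>
    intro st
    by_cases h : p hd = true
    · simp [List.foldl, List.filter, h, ih]
    · simp [List.foldl, List.filter, h, ih]

lemma bucketsB_getD (media_items : List (List (String × String))) (role : String) :
    (bucketsB media_items).getD role [] = pvCand media_items role := by
  have hmap :
      bucketsB media_items =
        (media_items.map (fun item =>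
            ((PySem.Dict.mk item).getD "role" "", (PySem.Dict.mk item).getD "media_name" ""))).foldl
          (fun d p => d.modify p.1 [] (· ++ [p.2])) PySem.Dict.empty := by
    rw [List.foldl_map]
    rfl
  rw [hmap, PySem.Dict.getD_foldl_modify_append]
  simp [pvCand, List.filter_map, List.map_map, Function.comp_def]

-- A's role loops = one pushA fold over the concatenation of the role candidate lists.
lemma roles_eq (media_items : List (List (String × String))) :
    ∀ (rs : List String) (st : List String × PySem.Set String),
      rs.foldl (fun st role =>
          media_items.foldl (fun st item =>
            if (PySem.Dict.mk item).getD "role" "" == role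
            then pushA st ((PySem.Dict.mk item).getD "media_name" "")
            else st) st) st
        = (rs.flatMap (pvCand media_items)).foldl pushA st := by
  intro rs
  induction rs with
  | nil => intro st; rfl
  | cons hd tl ih =>
    intro st
    simp only [List.foldl, List.flatMap_cons, List.foldl_append]
    rw [foldl_if_filter_map (fun item => (PySem.Dict.mk item).getD "role" "" == hd)
      (fun item => (PySem.Dict.mk item).getD "media_name" "") pushA, ih]
    rfl

-- Core invariant: while `seen` holds exactly the members of `ordered` and `d` is `ordered`
-- plus possibly an empty-string entry, A's push fold equals the Set.add (= dict.fromkeys) fold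
-- over the stripped names, followed by filtering out the empty string.
lemma push_eq_dedup (l : List String) :
    ∀ (ordered : List String) (seen : PySem.Set String) (d : List String),
      (∀ x, x ∈ seen ↔ x ∈ ordered) →
      d.filter (fun name => name ≠ "") = ordered →
      (l.foldl pushA (ordered, seen)).1
        = ((l.map PySem.Str.strip).foldl PySem.Set.add d).filter (fun name => name ≠ "") := by
  induction l with
  | nil => intro ordered seen d _ hd; simpa using hd.symm
  | cons hd tl ih =>
    intro ordered seen d hinv hfilter
    have hmemd : ∀ x, x ≠ "" → (x ∈ d ↔ x ∈ ordered) := by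
      intro x hx
      rw [← hfilter]
      simp [List.mem_filter, hx]
    simp only [List.foldl, List.map_cons]
    by_cases hempty : PySem.Str.strip hd = ""
    · have hA : pushA (ordered, seen) hd = (ordered, seen) := by
        simp [pushA, hempty]
      rw [hA, hempty]
      by_cases hin : ("" : String) ∈ d
      · rw [show PySem.Set.add d "" = d by simp [PySem.Set.add, hin]]
        exact ih ordered seen d hinv hfilter
      · rw [show PySem.Set.add d "" = d ++ [""] by simp [PySem.Set.add, hin]]
        refine ih ordered seen (d ++ [""]) hinv ?_
        have hf' : List.filter (fun name => !decide (name = "")) d = ordered := by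
          simpa using hfilter
        simp [List.filter_append, hf']
    · by_cases hmem : PySem.Str.strip hd ∈ ordered
      · have hseen : PySem.Str.strip hd ∈ seen := (hinv _).2 hmem
        have hA : pushA (ordered, seen) hd = (ordered, seen) := by
          simp [pushA, hempty, hseen]
        have hin : PySem.Str.strip hd ∈ d := (hmemd _ hempty).2 hmem
        rw [hA, show PySem.Set.add d (PySem.Str.strip hd) = d by simp [PySem.Set.add, hin]]
        exact ih ordered seen d hinv hfilter
      · have hseen : PySem.Str.strip hd ∉ seen := fun h => hmem ((hinv _).1 h)
        have hA : pushA (ordered, seen) hd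
            = (ordered ++ [PySem.Str.strip hd], PySem.Set.add seen (PySem.Str.strip hd)) := by
          simp [pushA, hempty, hseen]
        have hin : PySem.Str.strip hd ∉ d := fun h => hmem ((hmemd _ hempty).1 h)
        rw [hA, show PySem.Set.add d (PySem.Str.strip hd) = d ++ [PySem.Str.strip hd] by
          simp [PySem.Set.add, hin]]
        refine ih _ _ _ ?_ ?_
        · intro x; simp [PySem.Set.add, hseen, hinv x]
        · have hf' : List.filter (fun name => !decide (name = "")) d = ordered := by
            simpa using hfilter
          simp [List.filter_append, hf', hempty]

-- ===== VERDICT (by name: the statement is the Claim_ definition above) =====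
theorem ordered_reference_media_names_py_spec : Claim_equal_ordered_reference_media_names_py := by
  intro media_items fallback_names _
  unfold Spec_ordered_reference_media_names_py
  unfold ordered_reference_media_names_py ordered_reference_media_names_py_alt
  simp only [roles_eq, ← List.foldl_append]
  have hnames :
      (["base", "product", "logo", "reference"]).foldl
          (fun acc role => acc ++ (bucketsB media_items).getD role []) []
        = (["base", "product", "logo", "reference"]).flatMap (pvCand media_items) := by
    simp [List.foldl, bucketsB_getD, List.flatMap]
  rw [hnames]
  rw [show PySem.List.dedup = fun (xs : List String) => xs.foldl PySem.Set.add [] from rfl]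
  exact push_eq_dedup _ [] PySem.Set.empty [] (by intro x; simp [PySem.Set.empty]) rfl
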